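-- pv_equiv track=rewrite | github.com/MrFrames/airCrawler | Main_functions.py | get_cats
-- ===== SOURCE A (Python) =====
-- def get_cats(list_in):
--     room = []
--     shared = []
--     whole_place = []
--     other = []
--     for item in list_in:
--         if item[-2] == 'shared':
--             shared.append(item)
--         elif item[-2] == 'room':
--             room.append(item)
--         elif item[-2] == 'whole_place':
--             whole_place.append(item)
--         else:
--             other.append(item)
--     return [shared,room,whole_place,other]
-- ===== SOURCE B (Python) =====
-- def get_cats(list_in):
--     shared = [item for item in list_in if item[-2] == 'shared']
--     room = [item for item in list_in if item[-2] == 'room']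
--     whole_place = [item for item in list_in if item[-2] == 'whole_place']
--     other = [item for item in list_in
--              if item[-2] not in ('shared', 'room', 'whole_place')]
--     return [shared, room, whole_place, other]
-- ===== Notes on version B (the rewrite author's own statement) =====
-- stated objective: simpler
-- what changed: Replaces the single four-way branched accumulation loop by four independent order-preserving filtering passes, one comprehension per category.
import Mathlib
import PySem

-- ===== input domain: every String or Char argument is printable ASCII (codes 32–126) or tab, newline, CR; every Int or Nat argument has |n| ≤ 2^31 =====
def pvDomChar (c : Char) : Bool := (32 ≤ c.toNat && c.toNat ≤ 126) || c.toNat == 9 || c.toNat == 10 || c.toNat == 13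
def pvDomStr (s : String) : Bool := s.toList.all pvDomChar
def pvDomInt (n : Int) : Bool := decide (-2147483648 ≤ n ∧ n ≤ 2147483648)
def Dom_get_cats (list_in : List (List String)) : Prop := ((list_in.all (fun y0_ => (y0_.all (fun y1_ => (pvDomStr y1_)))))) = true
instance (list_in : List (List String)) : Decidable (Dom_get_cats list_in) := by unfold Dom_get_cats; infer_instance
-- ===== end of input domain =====

-- B replaces A's single four-way branched accumulation loop by four independent
-- order-preserving filtering passes (objective: simpler decomposition).

-- ===== PORT A =====
-- One pass, four accumulators, appended in branch order (item[-2] via pyGet?;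
-- the none case is unreachable under Pre_, where Python would raise IndexError).
def get_cats (list_in : List (List String)) : List (List (List String)) :=
  let st := list_in.foldl
    (fun (st : List (List String) × List (List String) × List (List String) × List (List String)) item =>
      match PySem.List.pyGet? item (-2) with
      | some v =>
        if v = "shared" then (st.1 ++ [item], st.2.1, st.2.2.1, st.2.2.2)
        else if v = "room" then (st.1, st.2.1 ++ [item], st.2.2.1, st.2.2.2)
        else if v = "whole_place" then (st.1, st.2.1, st.2.2.1 ++ [item], st.2.2.2)
        else (st.1, st.2.1, st.2.2.1, st.2.2.2 ++ [item])
      | none => st)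
    ([], [], [], [])
  [st.1, st.2.1, st.2.2.1, st.2.2.2]

-- ===== PORT B =====
-- Four independent filtering passes, one per category.
def get_cats_alt (list_in : List (List String)) : List (List (List String)) :=
  [ list_in.filter (fun item => PySem.List.pyGet? item (-2) == some "shared"),
    list_in.filter (fun item => PySem.List.pyGet? item (-2) == some "room"),
    list_in.filter (fun item => PySem.List.pyGet? item (-2) == some "whole_place"),
    list_in.filter (fun item =>
      match PySem.List.pyGet? item (-2) with
      | some v => ¬ (v = "shared" ∨ v = "room" ∨ v = "whole_place")
      | none => false) ]

-- ===== PRECONDITION & SPEC =====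
-- Pre_ excludes inputs containing an item of length < 2, on which A raises IndexError at item[-2].
def Pre_get_cats (list_in : List (List String)) : Prop :=
  ∀ item ∈ list_in, 2 ≤ item.length
instance (list_in : List (List String)) : Decidable (Pre_get_cats list_in) := by unfold Pre_get_cats; infer_instance

def pvWitness_get_cats : List (List String) :=
  [["a", "shared"], ["b", "room"], ["c", "attic"]]

def Spec_get_cats (list_in : List (List String)) (out : List (List (List String))) : Prop := out = get_cats_alt list_in
instance (list_in : List (List String)) (out : List (List (List String))) : Decidable (Spec_get_cats list_in out) := by unfold Spec_get_cats; infer_instance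

-- ===== CLAIM (what is proved, stated in full; the proofs are below) =====
def Claim_equal_get_cats : Prop := ∀ (list_in : List (List String)), Dom_get_cats list_in → Pre_get_cats list_in → Spec_get_cats list_in (get_cats list_in)

-- ===== LEMMAS AND PROOFS =====

-- Under Pre_, item[-2] exists.
theorem pyGet_isSome (item : List String) (h : 2 ≤ item.length) :
    ∃ v, PySem.List.pyGet? item (-2) = some v := by
  rw [PySem.List.pyGet?_neg_ofNat item 2 (by omega) h]
  exact ⟨_, List.getElem?_eq_getElem (by omega)⟩

theorem get_cats_fold (list_in : List (List String)) (hpre : Pre_get_cats list_in)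
    (s r w o : List (List String)) :
    list_in.foldl
      (fun (st : List (List String) × List (List String) × List (List String) × List (List String)) item =>
        match PySem.List.pyGet? item (-2) with
        | some v =>
          if v = "shared" then (st.1 ++ [item], st.2.1, st.2.2.1, st.2.2.2)
          else if v = "room" then (st.1, st.2.1 ++ [item], st.2.2.1, st.2.2.2)
          else if v = "whole_place" then (st.1, st.2.1, st.2.2.1 ++ [item], st.2.2.2)
          else (st.1, st.2.1, st.2.2.1, st.2.2.2 ++ [item])
        | none => st)
      (s, r, w, o) =
    (s ++ list_in.filter (fun item => PySem.List.pyGet? item (-2) == some "shared"),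
     r ++ list_in.filter (fun item => PySem.List.pyGet? item (-2) == some "room"),
     w ++ list_in.filter (fun item => PySem.List.pyGet? item (-2) == some "whole_place"),
     o ++ list_in.filter (fun item =>
        match PySem.List.pyGet? item (-2) with
        | some v => ¬ (v = "shared" ∨ v = "room" ∨ v = "whole_place")
        | none => false)) := by
  induction list_in generalizing s r w o with
  | nil => simp
  | cons hd tl ih =>
    obtain ⟨v, hv⟩ := pyGet_isSome hd (hpre hd (by simp))
    have hpre' : Pre_get_cats tl := fun it hit => hpre it (by simp [hit])
    simp only [List.foldl_cons, List.filter_cons, hv]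
    by_cases h1 : v = "shared"
    · simp [h1, ih hpre']
    · by_cases h2 : v = "room"
      · simp [h2, ih hpre']
      · by_cases h3 : v = "whole_place"
        · simp [h1, h2, h3, ih hpre']
        · simp [h1, h2, h3, ih hpre']

-- ===== VERDICT (by name: the statement is the Claim_ definition above) =====
theorem get_cats_spec : Claim_equal_get_cats := by
  intro list_in _ hpre
  unfold Spec_get_cats get_cats get_cats_alt
  simp only [get_cats_fold list_in hpre [] [] [] [], List.nil_append]
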